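-- pv_equiv track=rewrite | github.com/ahmedyarub/algorithms | 0022_avoidObstacles.py | solution
-- ===== SOURCE A (Python) =====
-- def solution(inputArray):
--     inputArray.sort()
--
--     max_value = max(inputArray)
--
--     for i in range(1, max_value - 1):
--         invalid = False
--         for j in range(i, max_value + 1, i):
--             if j in inputArray:
--                 invalid = True
--                 break
--         if not invalid:
--             return i
--
--     return max_value + 1
-- ===== SOURCE B (Python) =====
-- def solution(inputArray):
--     inputArray.sort()
--
--     max_value = max(inputArray)
--
--     blocked = set()
--     for x in inputArray:
--         if x >= 1:
--             d = 1
--             while d * d <= x: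
--                 if x % d == 0:
--                     blocked.add(d)
--                     blocked.add(x // d)
--                 d += 1
--
--     return next((i for i in range(1, max_value - 1) if i not in blocked),
--                 max_value + 1)
-- ===== Notes on version B (the rewrite author's own statement) =====
-- stated objective: faster
-- what changed: B precomputes one 'blocked' set containing every divisor of the positive obstacle values (enumerating divisor pairs d and x//d with d*d <= x) in a single pass over the obstacles, then returns the first candidate step absent from that set; A instead, for every candidate step, generates all of its multiples and does a linear membership scan of the list per multiple. The sort and max are kept for the mutation side-effect and the empty-input ValueError.
import Mathlib
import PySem

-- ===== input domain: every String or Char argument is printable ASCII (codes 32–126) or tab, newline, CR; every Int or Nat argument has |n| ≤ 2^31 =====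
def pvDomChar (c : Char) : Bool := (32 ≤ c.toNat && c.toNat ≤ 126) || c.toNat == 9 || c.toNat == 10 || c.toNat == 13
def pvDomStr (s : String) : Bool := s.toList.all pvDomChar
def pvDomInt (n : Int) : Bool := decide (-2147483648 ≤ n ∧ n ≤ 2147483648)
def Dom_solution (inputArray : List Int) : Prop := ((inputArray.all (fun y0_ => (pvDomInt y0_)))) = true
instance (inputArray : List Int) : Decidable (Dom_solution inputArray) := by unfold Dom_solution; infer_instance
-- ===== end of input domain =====

-- B precomputes one set of all divisors of the positive obstacles (enumerating divisor pairs
-- d, x//d with d*d <= x) and then picks the first candidate step not in it, instead of A's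
-- per-candidate multiple generation with a membership scan per multiple; equivalence is about
-- the RETURN value (both sort inputArray in place).

-- ===== PORT A =====
def solution (inputArray : List Int) : Int :=
  let arr := PySem.List.sorted inputArray (fun x => x)
  match PySem.List.max? arr (fun x => x) with
  | none => 0   -- unreachable: Pre_solution excludes the empty list (Python max raises ValueError)
  | some maxValue =>
    match (PySem.List.pyRange 1 (maxValue - 1) 1).find? (fun i =>
        !((PySem.List.pyRange i (maxValue + 1) i).any (fun j => arr.contains j))) with
    | some i => i
    | none => maxValue + 1

-- ===== PORT B =====
-- inner while loop of B: enumerate divisor pairs (d, x // d) for d * d <= x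
def divLoop (x d : Int) (s : PySem.Set Int) : PySem.Set Int :=
  if d * d ≤ x then
    divLoop x (d + 1)
      (if PySem.Int.mod x d == 0 then
        PySem.Set.add (PySem.Set.add s d) (PySem.Int.floordiv x d)
      else s)
  else s
termination_by (x + 1 - d).toNat
decreasing_by
  have h4 : 4 * (d * d - d) ≥ -1 := by nlinarith [mul_self_nonneg (2 * d - 1)]
  omega

def solution_alt (inputArray : List Int) : Int :=
  let arr := PySem.List.sorted inputArray (fun x => x)
  match PySem.List.max? arr (fun x => x) with
  | none => 0   -- unreachable: Pre_solution excludes the empty list (Python max raises ValueError)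
  | some maxValue =>
    let blocked : PySem.Set Int := arr.foldl (fun s x =>
      if 1 ≤ x then divLoop x 1 s else s) PySem.Set.empty
    (((PySem.List.pyRange 1 (maxValue - 1) 1).find? (fun i =>
        !(PySem.Set.contains blocked i))).getD (maxValue + 1))

-- ===== PRECONDITION & SPEC =====
-- Pre_ excludes only the empty list, on which Python's max(inputArray) raises ValueError.
def Pre_solution (inputArray : List Int) : Prop := inputArray ≠ []
instance (inputArray : List Int) : Decidable (Pre_solution inputArray) := by unfold Pre_solution; infer_instance
def pvWitness_solution : List Int := [5, 3, 6, 7, 9]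

def Spec_solution (inputArray : List Int) (out : Int) : Prop := out = solution_alt inputArray
instance (inputArray : List Int) (out : Int) : Decidable (Spec_solution inputArray out) := by unfold Spec_solution; infer_instance

-- ===== CLAIM (what is proved, stated in full; the proofs are below) =====
def Claim_equal_solution : Prop := ∀ (inputArray : List Int), Dom_solution inputArray → Pre_solution inputArray → Spec_solution inputArray (solution inputArray)

-- ===== LEMMAS AND PROOFS =====

lemma find?_congr_mem {α : Type} (l : List α) (p q : α → Bool)
    (h : ∀ x ∈ l, p x = q x) : l.find? p = l.find? q := by
  induction l with
  | nil => rfl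
  | cons a t ih =>
    simp only [List.find?_cons]
    rw [h a (by simp)]
    cases q a with
    | true => rfl
    | false => exact ih (fun x hx => h x (by simp [hx]))

-- membership after the divisor-pair loop starting at d (the loop starts at d = 1)
lemma mem_divLoop (x : Int) (d : Int) (s : PySem.Set Int) (i : Int) (hd1 : 1 ≤ d) :
    i ∈ divLoop x d s
      ↔ i ∈ s ∨ ∃ e, d ≤ e ∧ e * e ≤ x ∧ e ∣ x ∧ (i = e ∨ i = PySem.Int.floordiv x e) := by
  revert hd1
  induction d, s using divLoop.induct x with
  | case1 d s hle ih =>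
    intro hd1
    have ih' := ih (by omega)
    rw [divLoop, if_pos hle]
    by_cases hd : d ∣ x
    · have hb : (PySem.Int.mod x d == 0) = true := by
        simp [PySem.Int.mod_eq_zero_iff_dvd, hd]
      rw [dif_pos hb] at ih'
      rw [if_pos hb, ih', PySem.Set.mem_add, PySem.Set.mem_add]
      constructor
      · rintro (((h | hid) | hif) | ⟨e, he1, he2, he3, he4⟩)
        · exact Or.inl h
        · exact Or.inr ⟨d, le_refl d, hle, hd, Or.inl hid⟩
        · exact Or.inr ⟨d, le_refl d, hle, hd, Or.inr hif⟩
        · exact Or.inr ⟨e, by omega, he2, he3, he4⟩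
      · rintro (h | ⟨e, he1, he2, he3, hie | hif⟩)
        · exact Or.inl (Or.inl (Or.inl h))
        · rcases eq_or_lt_of_le he1 with heq | hlt
          · exact Or.inl (Or.inl (Or.inr (by rw [hie, heq])))
          · exact Or.inr ⟨e, by omega, he2, he3, Or.inl hie⟩
        · rcases eq_or_lt_of_le he1 with heq | hlt
          · exact Or.inl (Or.inr (by rw [hif, heq]))
          · exact Or.inr ⟨e, by omega, he2, he3, Or.inr hif⟩
    · have hb : ¬ ((PySem.Int.mod x d == 0) = true) := by
        simp [PySem.Int.mod_eq_zero_iff_dvd, hd]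
      rw [dif_neg hb] at ih'
      rw [if_neg hb, ih']
      constructor
      · rintro (h | ⟨e, he1, he2, he3, he4⟩)
        · exact Or.inl h
        · exact Or.inr ⟨e, by omega, he2, he3, he4⟩
      · rintro (h | ⟨e, he1, he2, he3, he4⟩)
        · exact Or.inl h
        · rcases eq_or_lt_of_le he1 with heq | hlt
          · exact absurd he3 (by rw [heq] at hd; exact hd)
          · exact Or.inr ⟨e, by omega, he2, he3, he4⟩
  | case2 d s hle =>
    intro hd1
    rw [divLoop, if_neg hle]
    constructor
    · exact Or.inl
    · rintro (h | ⟨e, he1, he2, _, _⟩)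
      · exact h
      · exact absurd he2 (by nlinarith)

-- for a positive obstacle x, the pair loop from d = 1 collects exactly the divisors 1 ≤ i ≤ x
lemma mem_divLoop_one (x : Int) (hx : 1 ≤ x) (s : PySem.Set Int) (i : Int) :
    i ∈ divLoop x 1 s ↔ i ∈ s ∨ (1 ≤ i ∧ i ≤ x ∧ i ∣ x) := by
  rw [mem_divLoop x 1 s i (le_refl 1)]
  constructor
  · rintro (h | ⟨e, he1, he2, ⟨c, rfl⟩, rfl | rfl⟩)
    · exact Or.inl h
    · exact Or.inr ⟨he1, by nlinarith, Dvd.intro c rfl⟩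
    · have he0 : e ≠ 0 := by omega
      rw [PySem.Int.floordiv_eq_ediv_of_pos (by omega), Int.mul_ediv_cancel_left c he0]
      have hc1 : 1 ≤ c := by nlinarith
      exact Or.inr ⟨hc1, by nlinarith, Dvd.intro_left e rfl⟩
  · rintro (h | ⟨hi1, hi2, c, rfl⟩)
    · exact Or.inl h
    · have hc1 : 1 ≤ c := by nlinarith
      by_cases hsq : i * i ≤ i * c
      · exact Or.inr ⟨i, hi1, hsq, Dvd.intro c rfl, Or.inl rfl⟩
      · refine Or.inr ⟨c, hc1, by nlinarith, Dvd.intro_left i rfl, Or.inr ?_⟩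
        rw [PySem.Int.floordiv_eq_ediv_of_pos (by omega), mul_comm,
          Int.mul_ediv_cancel_left i (by omega)]

-- membership in the blocked set: i is a divisor (with 1 ≤ i ≤ x) of some positive obstacle
lemma mem_blocked (arr : List Int) (s : PySem.Set Int) (i : Int) :
    i ∈ arr.foldl (fun s x => if 1 ≤ x then divLoop x 1 s else s) s
      ↔ i ∈ s ∨ ∃ x ∈ arr, 1 ≤ x ∧ 1 ≤ i ∧ i ≤ x ∧ i ∣ x := by
  induction arr generalizing s with
  | nil => simp
  | cons a t ih =>
    simp only [List.foldl_cons, List.mem_cons]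
    by_cases ha : (1 : Int) ≤ a
    · rw [if_pos ha, ih, mem_divLoop_one a ha]
      constructor
      · rintro ((h | ⟨hi1, hi2, hdvd⟩) | ⟨x, hx, hs⟩)
        · exact Or.inl h
        · exact Or.inr ⟨a, Or.inl rfl, ha, hi1, hi2, hdvd⟩
        · exact Or.inr ⟨x, Or.inr hx, hs⟩
      · rintro (h | ⟨x, rfl | hx, h1, h2, h3, h4⟩)
        · exact Or.inl (Or.inl h)
        · exact Or.inl (Or.inr ⟨h2, h3, h4⟩)
        · exact Or.inr ⟨x, hx, h1, h2, h3, h4⟩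
    · rw [if_neg ha, ih]
      constructor
      · rintro (h | ⟨x, hx, hs⟩)
        · exact Or.inl h
        · exact Or.inr ⟨x, Or.inr hx, hs⟩
      · rintro (h | ⟨x, rfl | hx, h1, hs⟩)
        · exact Or.inl h
        · exact absurd h1 ha
        · exact Or.inr ⟨x, hx, h1, hs⟩

-- one candidate step: "some multiple of i up to m is an obstacle" = "i is blocked"
lemma any_multiple_eq (arr : List Int) (m i : Int) (hi : 0 < i)
    (hm : ∀ x ∈ arr, x ≤ m) :
    ((PySem.List.pyRange i (m + 1) i).any (fun j => arr.contains j))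
      = PySem.Set.contains (arr.foldl (fun s x =>
          if 1 ≤ x then divLoop x 1 s else s) PySem.Set.empty) i := by
  apply Bool.eq_iff_iff.mpr
  rw [PySem.Set.contains_iff, mem_blocked]
  simp only [List.any_eq_true, List.contains_iff_mem,
    PySem.List.mem_pyRange_iff_of_pos hi]
  constructor
  · rintro ⟨j, ⟨hij, hjm, hdvd⟩, hjmem⟩
    have : i ∣ j := by have := dvd_add hdvd (dvd_refl i); simpa using this
    exact Or.inr ⟨j, hjmem, by omega, by omega, hij, this⟩
  · rintro (h | ⟨x, hx, hx1, hi1, hix, hdvd⟩)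
    · simp at h
    · exact ⟨x, ⟨hix, by have := hm x hx; omega, dvd_sub hdvd (dvd_refl i)⟩, hx⟩

-- ===== VERDICT (by name: the statement is the Claim_ definition above) =====
theorem solution_spec : Claim_equal_solution := by
  intro inputArray _ hpre
  unfold Spec_solution solution solution_alt
  cases hmax : PySem.List.max? (PySem.List.sorted inputArray (fun x => x)) (fun x => x) with
  | none => simp only [hmax]
  | some m =>
    have hmx : ∀ x ∈ PySem.List.sorted inputArray (fun x => x), x ≤ m :=
      PySem.List.max?_isMax hmax
    simp only [hmax]
    rw [find?_congr_mem (PySem.List.pyRange 1 (m - 1) 1)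
      (fun i => !((PySem.List.pyRange i (m + 1) i).any
        (fun j => (PySem.List.sorted inputArray (fun x => x)).contains j)))
      (fun i => !(PySem.Set.contains ((PySem.List.sorted inputArray (fun x => x)).foldl
        (fun s x => if 1 ≤ x then divLoop x 1 s else s) PySem.Set.empty) i))
      (by
        intro i hi
        have h1 : (1 : Int) ≤ i := ((PySem.List.mem_pyRange_one).mp hi).1
        simp only
        rw [any_multiple_eq _ m i (by omega) hmx])]
    cases (PySem.List.pyRange 1 (m - 1) 1).find? _ with
    | none => rfl
    | some i => rfl
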